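-- pv_equiv track=rewrite | github.com/MrBrantCode/unitest_baseline | mut_generate/mist_train_taco/taco_6062/solution.py | count_good_subsequences
-- ===== SOURCE A (Python) =====
-- def count_good_subsequences(n, arr):
--     narr = [bin(i).count('1') for i in arr]
--     res = 0
--     dp = [[0, 0] for _ in range(n + 1)]
--     dp[0][0] = 1
--     sm = [0]
--
--     for i in narr:
--         sm.append(sm[-1] + i)
--
--     for i in range(1, n + 1):
--         t = res
--         if i > 1:
--             if sm[i] % 2:
--                 res += dp[i - 2][1]
--             else:
--                 res += dp[i - 2][0]
--         dp[i][sm[i] % 2] = dp[i - 1][sm[i] % 2] + 1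
--         dp[i][sm[i] % 2 ^ 1] = dp[i - 1][sm[i] % 2 ^ 1]
--
--     for l in range(1, n + 1):
--         ma = narr[l - 1]
--         for r in range(l + 1, min(n + 1, l + 63)):
--             ma = max(ma, narr[r - 1])
--             now = sm[r] - sm[l - 1]
--             if now % 2 == 0 and ma > now - ma:
--                 res -= 1
--
--     return res
-- ===== SOURCE B (Python) =====
-- def count_good_subsequences(n, arr):
--     narr = [bin(arr[i]).count('1') for i in range(n)]
--     # closed-form count of even-sum subarrays of length >= 2 from a parity tally of the prefix sums
--     pref = [0] * (n + 1)
--     pref[0] = 0  # base prefix sum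
--     for i in range(n):
--         pref[i + 1] = pref[i] + narr[i]
--     c0 = sum(1 for s in pref if s % 2 == 0)
--     c1 = len(pref) - c0
--     even_elems = sum(1 for v in narr if v % 2 == 0)
--     res = c0 * (c0 - 1) // 2 + c1 * (c1 - 1) // 2 - even_elems
--     # subtract bad windows: even-sum, length 2..63, max bitcount exceeding the rest
--     for l in range(n):
--         ma = narr[l]
--         cur = narr[l]
--         for r in range(l + 1, min(n, l + 63)):
--             ma = max(ma, narr[r])
--             cur += narr[r]
--             if cur % 2 == 0 and 2 * ma > cur:
--                 res -= 1
--     return res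
-- ===== Notes on version B (the rewrite author's own statement) =====
-- stated objective: simpler
-- what changed: B replaces A's O(n)-size DP table over prefix-sum parities by a closed-form pair count (c0*(c0-1)//2 + c1*(c1-1)//2 minus the number of even-bitcount elements) computed from a single parity tally of the prefix sums, and runs the bounded bad-window subtraction 0-based with a running window sum instead of A's prefix-sum-difference lookups.
import Mathlib
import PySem

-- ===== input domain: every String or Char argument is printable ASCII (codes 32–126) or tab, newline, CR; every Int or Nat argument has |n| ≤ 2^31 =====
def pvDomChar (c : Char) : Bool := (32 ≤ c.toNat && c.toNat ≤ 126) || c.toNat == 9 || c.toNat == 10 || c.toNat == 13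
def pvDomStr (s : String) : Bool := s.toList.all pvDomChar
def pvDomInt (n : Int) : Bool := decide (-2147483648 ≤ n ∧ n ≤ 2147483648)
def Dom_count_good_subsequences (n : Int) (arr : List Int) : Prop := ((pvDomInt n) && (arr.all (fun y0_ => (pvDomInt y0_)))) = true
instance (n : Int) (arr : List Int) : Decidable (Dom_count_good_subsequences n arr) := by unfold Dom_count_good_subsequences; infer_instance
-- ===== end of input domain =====

-- B replaces A's DP table over prefix parities by a closed-form pair count (c0*(c0-1)/2 + c1*(c1-1)/2 - #even
-- elements) and runs the bounded bad-window scan 0-based with a running window sum instead of prefix-sum lookups;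
-- objective: simpler.

-- ===== PORT A =====
-- A-side helpers: the two loop bodies of A, named (each is the literal Python loop body)
def pvA_step1 (sm : List Int) (st : Int × List (Int × Int)) (i : Int) : Int × List (Int × Int) :=
  let res := st.1
  let dp := st.2
  -- `t = res` in A is dead code (t is never read)
  let res := if 1 < i then
      (if PySem.Int.mod (PySem.List.pyGetD sm i 0) 2 == 1   -- `if sm[i] % 2:` (mod 2 is 0 or 1)
         then res + (PySem.List.pyGetD dp (i-2) (0,0)).2
         else res + (PySem.List.pyGetD dp (i-2) (0,0)).1)
    else res
  -- dp[i][sm[i]%2] = dp[i-1][sm[i]%2] + 1 ; dp[i][sm[i]%2^1] = dp[i-1][sm[i]%2^1]  (2-list as a pair)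
  let prev := PySem.List.pyGetD dp (i-1) ((0:Int),(0:Int))
  let cur := if PySem.Int.mod (PySem.List.pyGetD sm i 0) 2 == 1
               then (prev.1, prev.2 + 1) else (prev.1 + 1, prev.2)
  (res, PySem.List.pySetD dp i cur)

def pvA_inner (narr sm : List Int) (l : Int) (q : Int × Int) (r : Int) : Int × Int :=
  let ma := max q.2 (PySem.List.pyGetD narr (r-1) 0)
  let now := PySem.List.pyGetD sm r 0 - PySem.List.pyGetD sm (l-1) 0
  if PySem.Int.mod now 2 == 0 ∧ ma > now - ma then (q.1 - 1, ma) else (q.1, ma)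

def count_good_subsequences (n : Int) (arr : List Int) : Int :=
  let narr : List Int := arr.map (fun i => (PySem.Int.bitCount i : Int))  -- bin(i).count('1')
  let dp0 : List (Int × Int) := PySem.List.pySetD (List.replicate (n+1).toNat ((0:Int),(0:Int))) 0 (1,0)
  let sm : List Int := narr.foldl (fun s i => s ++ [PySem.List.pyGetD s (-1) 0 + i]) [0]
  let st := (PySem.List.pyRange 1 (n+1) 1).foldl (pvA_step1 sm) (0, dp0)
  (PySem.List.pyRange 1 (n+1) 1).foldl
    (fun res l =>
      ((PySem.List.pyRange (l+1) (min (n+1) (l+63)) 1).foldl (pvA_inner narr sm l)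
        (res, PySem.List.pyGetD narr (l-1) 0)).1)
    st.1

-- ===== PORT B =====
-- B-side helper: the body of B's bad-window loop
def pvB_inner (narr : List Int) (q : Int × Int × Int) (r : Int) : Int × Int × Int :=
  let ma := max q.2.1 (PySem.List.pyGetD narr r 0)
  let cur := q.2.2 + PySem.List.pyGetD narr r 0
  if PySem.Int.mod cur 2 == 0 ∧ 2 * ma > cur then (q.1 - 1, ma, cur) else (q.1, ma, cur)

def count_good_subsequences_alt (n : Int) (arr : List Int) : Int :=
  let narr : List Int := (PySem.List.pyRange 0 n 1).map
    (fun i => (PySem.Int.bitCount (PySem.List.pyGetD arr i 0) : Int))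
  let pref : List Int := PySem.List.pySetD (List.replicate (n+1).toNat (0:Int)) 0 0
  let pref := (PySem.List.pyRange 0 n 1).foldl
    (fun p i => PySem.List.pySetD p (i+1) (PySem.List.pyGetD p i 0 + PySem.List.pyGetD narr i 0)) pref
  let c0 : Int := pref.foldl (fun acc s => if PySem.Int.mod s 2 == 0 then acc + 1 else acc) 0
  let c1 : Int := (pref.length : Int) - c0
  let ev : Int := narr.foldl (fun acc v => if PySem.Int.mod v 2 == 0 then acc + 1 else acc) 0
  let res0 : Int := PySem.Int.floordiv (c0 * (c0 - 1)) 2 + PySem.Int.floordiv (c1 * (c1 - 1)) 2 - ev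
  (PySem.List.pyRange 0 n 1).foldl
    (fun res l =>
      ((PySem.List.pyRange (l + 1) (min n (l + 63)) 1).foldl (pvB_inner narr)
        (res, PySem.List.pyGetD narr l 0, PySem.List.pyGetD narr l 0)).1)
    res0

-- ===== PRECONDITION & SPEC =====
-- A raises IndexError when n < 0 (dp[0][0] on an empty table) or n > len(arr) (sm[i]); Pre_ is exactly where A returns.
def Pre_count_good_subsequences (n : Int) (arr : List Int) : Prop := 0 ≤ n ∧ n ≤ (arr.length : Int)
instance (n : Int) (arr : List Int) : Decidable (Pre_count_good_subsequences n arr) := by unfold Pre_count_good_subsequences; infer_instance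
def pvWitness_count_good_subsequences : Int × List Int := (3, [1, 2, 7])

def Spec_count_good_subsequences (n : Int) (arr : List Int) (out : Int) : Prop := out = count_good_subsequences_alt n arr
instance (n : Int) (arr : List Int) (out : Int) : Decidable (Spec_count_good_subsequences n arr out) := by unfold Spec_count_good_subsequences; infer_instance

-- ===== CLAIM (what is proved, stated in full; the proofs are below) =====
def Claim_equal_count_good_subsequences : Prop := ∀ (n : Int) (arr : List Int), Dom_count_good_subsequences n arr → Pre_count_good_subsequences n arr → Spec_count_good_subsequences n arr (count_good_subsequences n arr)

-- ===== LEMMAS AND PROOFS =====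
-- popcounts of the input (A's narr / B's narr before truncation)
def pvBC (arr : List Int) : List Int := arr.map (fun i => (PySem.Int.bitCount i : Int))
-- prefix sum of the first k bitcounts
def pvS (u : List Int) (k : Nat) : Int := (u.take k).sum
-- how many of the prefix sums S 0 .. S k are even / odd
def pvC0 (u : List Int) (k : Nat) : Int := (((List.range (k+1)).countP (fun i => pvS u i % 2 == 0)) : Int)
def pvC1 (u : List Int) (k : Nat) : Int := (((List.range (k+1)).countP (fun i => pvS u i % 2 == 1)) : Int)
-- number of even bitcounts among the first k elements
def pvEv (u : List Int) (k : Nat) : Int := (((u.take k).countP (fun v => v % 2 == 0)) : Int)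
-- A's first-loop accumulator after the iterations i = 1 .. k
def pvE (u : List Int) : Nat → Int
  | 0 => 0
  | (k+1) => pvE u k + (if 1 < k+1 then (if pvS u (k+1) % 2 == 1 then pvC1 u (k-1) else pvC0 u (k-1)) else 0)
-- A's dp table after the iterations i = 1 .. k
def pvDP (u : List Int) (N k : Nat) : List (Int × Int) :=
  (List.range (N+1)).map (fun j => if j ≤ k then (pvC0 u j, pvC1 u j) else ((0:Int),(0:Int)))
-- the prefix-sum list A and B build by appending
def pvSm (u : List Int) : List Int := List.scanl (· + ·) 0 u

lemma pv_sm_build (u pre : List Int) (a : Int) :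
    u.foldl (fun s i => s ++ [PySem.List.pyGetD s (-1) 0 + i]) (pre ++ [a]) = pre ++ List.scanl (· + ·) a u := by
  induction u generalizing pre a with
  | nil => simp
  | cons x u ih =>
    rw [List.foldl_cons, PySem.List.pyGetD_neg_one_append_singleton, ih (pre ++ [a]) (a + x)]
    simp

lemma pv_sm_build0 (u : List Int) :
    u.foldl (fun s i => s ++ [PySem.List.pyGetD s (-1) 0 + i]) [0] = pvSm u := by
  have := pv_sm_build u [] 0
  simpa [pvSm] using this

lemma pv_scanl_getD (u : List Int) (a : Int) (k : Nat) (hk : k ≤ u.length) :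
    (List.scanl (· + ·) a u).getD k 0 = a + (u.take k).sum := by
  induction u generalizing a k with
  | nil =>
    have hk0 : k = 0 := by simpa using hk
    subst hk0; simp
  | cons x u ih =>
    cases k with
    | zero => simp [List.scanl_cons]
    | succ k =>
      simp only [List.scanl_cons, List.getD_cons_succ, List.take_succ_cons, List.sum_cons]
      rw [ih (a + x) k (by simpa using hk)]
      ring

lemma pv_sm_getD (u : List Int) (k : Nat) (hk : k ≤ u.length) :
    (pvSm u).getD k 0 = pvS u k := by
  simpa [pvSm, pvS] using pv_scanl_getD u 0 k hk

lemma pvS_succ (u : List Int) (k : Nat) (hk : k < u.length) :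
    pvS u (k+1) = pvS u k + u[k] := by
  unfold pvS
  exact List.sum_take_succ u k hk

lemma pvS_parity (u : List Int) (k : Nat) : pvS u k % 2 = 0 ∨ pvS u k % 2 = 1 := by
  omega

lemma pvC0_succ (u : List Int) (k : Nat) :
    pvC0 u (k+1) = pvC0 u k + (if pvS u (k+1) % 2 == 1 then 0 else 1) := by
  simp only [pvC0, List.range_succ (n := k+1), List.countP_append, List.countP_singleton]
  rcases pvS_parity u (k+1) with h | h <;> simp [h]

lemma pvC1_succ (u : List Int) (k : Nat) :
    pvC1 u (k+1) = pvC1 u k + (if pvS u (k+1) % 2 == 1 then 1 else 0) := by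
  simp only [pvC1, List.range_succ (n := k+1), List.countP_append, List.countP_singleton]
  rcases pvS_parity u (k+1) with h | h <;> simp [h]

lemma pvC0_zero (u : List Int) : pvC0 u 0 = 1 := by simp [pvC0, pvS, List.range_one]
lemma pvC1_zero (u : List Int) : pvC1 u 0 = 0 := by simp [pvC1, pvS, List.range_one]

lemma pvC_total (u : List Int) (k : Nat) : pvC0 u k + pvC1 u k = (k:Int) + 1 := by
  induction k with
  | zero => simp [pvC0_zero, pvC1_zero]
  | succ k ih =>
    rw [pvC0_succ, pvC1_succ]
    rcases pvS_parity u (k+1) with h | h <;> simp [h] <;> push_cast <;> omega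

lemma pvEv_succ (u : List Int) (k : Nat) (hk : k < u.length) :
    pvEv u (k+1) = pvEv u k + (if u[k] % 2 == 0 then 1 else 0) := by
  simp only [pvEv, List.take_succ, List.getElem?_eq_getElem hk, Option.toList_some,
    List.countP_append, List.countP_singleton]
  split <;> simp

lemma pvE_succ2 (u : List Int) (k : Nat) :
    pvE u (k+1) = pvE u k + (if pvS u (k+1) % 2 == 1
      then pvC1 u k - (if pvS u k % 2 == 1 then 1 else 0)
      else pvC0 u k - (if pvS u k % 2 == 0 then 1 else 0)) := by
  cases k with
  | zero =>
    have h0 : pvS u 0 = 0 := by simp [pvS]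
    simp only [pvE, pvC0_zero, pvC1_zero, h0]
    norm_num
  | succ k =>
    show pvE u (k+1) + _ = _
    have h1 := pvC0_succ u k
    have h2 := pvC1_succ u k
    simp only [pvE, Nat.add_sub_cancel]
    rcases pvS_parity u (k+1) with h | h <;> rcases pvS_parity u (k+2) with h3 | h3 <;>
      simp [h, h3] at h1 h2 ⊢ <;> omega

lemma pv_ident (u : List Int) (N : Nat) (hN : N ≤ u.length) :
    2 * pvE u N + 2 * pvEv u N = pvC0 u N * (pvC0 u N - 1) + pvC1 u N * (pvC1 u N - 1) := by
  induction N with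
  | zero => simp [pvE, pvEv, pvC0_zero, pvC1_zero]
  | succ N ih =>
    have hN2 : N < u.length := by omega
    have ih2 := ih (by omega)
    rw [pvE_succ2, pvEv_succ u N hN2, pvC0_succ, pvC1_succ]
    have hsum := pvS_succ u N hN2
    have hA := pvS_parity u N
    have hu : u[N] % 2 = 0 ∨ u[N] % 2 = 1 := by omega
    rcases hA with ha | ha <;> rcases hu with hb | hb <;>
      rcases pvS_parity u (N+1) with hc | hc <;>
      first
        | (exfalso; omega)
        | (simp [ha, hb, hc] <;> linear_combination ih2)

lemma pv_dp_getD (u : List Int) (N k j : Nat) (hj : j ≤ N) :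
    (pvDP u N k).getD j ((0:Int),(0:Int)) = if j ≤ k then (pvC0 u j, pvC1 u j) else ((0:Int),(0:Int)) := by
  unfold pvDP
  rw [List.getD_eq_getElem?_getD, List.getElem?_map, List.getElem?_range (by omega)]
  simp

lemma pv_dp_set (u : List Int) (N k : Nat) (hk : k + 1 ≤ N) :
    (pvDP u N k).set (k+1) (pvC0 u (k+1), pvC1 u (k+1)) = pvDP u N (k+1) := by
  unfold pvDP
  apply List.ext_getElem
  · simp
  · intro j hj hj'
    simp only [List.length_set, List.length_map, List.length_range] at hj
    rw [List.getElem_set]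
    simp only [List.getElem_map, List.getElem_range]
    rcases eq_or_ne j (k+1) with h | h
    · subst h; simp
    · rw [if_neg (by omega)]
      by_cases hjk : j ≤ k
      · rw [if_pos hjk, if_pos (by omega)]
      · rw [if_neg hjk, if_neg (by omega)]

lemma pv_dp0 (u : List Int) (N : Nat) :
    PySem.List.pySetD (List.replicate (N+1) ((0:Int),(0:Int))) 0 ((1:Int),(0:Int)) = pvDP u N 0 := by
  have h0 : ((0:Int)) = ((0:Nat):Int) := rfl
  rw [h0, PySem.List.pySetD_natCast]
  apply List.ext_getElem
  · simp [pvDP]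
  · intro j hj hj'
    simp only [List.length_set, List.length_replicate] at hj
    rw [List.getElem_set]
    simp only [pvDP, List.getElem_map, List.getElem_range, List.getElem_replicate]
    rcases Nat.eq_zero_or_pos j with h | h
    · subst h; simp [pvC0_zero, pvC1_zero]
    · rw [if_neg (by omega), if_neg (by omega)]
      norm_num

lemma pv_mod2 (x : Int) : PySem.Int.mod x 2 = x % 2 :=
  PySem.Int.mod_eq_emod_of_pos (by norm_num)

lemma pv_loop1 (u : List Int) (N : Nat) (hN : N ≤ u.length) (k : Nat) (hk : k ≤ N) :
    (PySem.List.pyRange 1 ((k:Int)+1) 1).foldl (pvA_step1 (pvSm u)) (0, pvDP u N 0)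
      = (pvE u k, pvDP u N k) := by
  induction k with
  | zero => rw [PySem.List.pyRange_one_eq_nil (by norm_num)]; simp [pvE]
  | succ k ih =>
    have hk' : k ≤ N := by omega
    have hcast : ((k+1:Nat):Int) + 1 = (((k:Nat):Int)+1) + 1 := by push_cast; ring
    rw [hcast, PySem.List.pyRange_one_succ_right (by omega), List.foldl_append,
      ih hk', List.foldl_cons, List.foldl_nil]
    have hi : (((k:Nat):Int)+1) = ((k+1:Nat):Int) := by push_cast; ring
    have hsm : PySem.List.pyGetD (pvSm u) (((k:Nat):Int)+1) 0 = pvS u (k+1) := by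
      rw [hi, PySem.List.pyGetD_natCast, pv_sm_getD u (k+1) (by omega)]
    have hprev : PySem.List.pyGetD (pvDP u N k) ((((k:Nat):Int)+1) - 1) ((0:Int),(0:Int))
        = (pvC0 u k, pvC1 u k) := by
      have h2 : (((k:Nat):Int)+1) - 1 = ((k:Nat):Int) := by ring
      rw [h2, PySem.List.pyGetD_natCast, pv_dp_getD u N k k hk']
      simp
    have hset : ∀ v, PySem.List.pySetD (pvDP u N k) (((k:Nat):Int)+1) v
        = (pvDP u N k).set (k+1) v := by
      intro v; rw [hi, PySem.List.pySetD_natCast]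
    have hC0 := pvC0_succ u k
    have hC1 := pvC1_succ u k
    have hdpset := pv_dp_set u N k hk
    unfold pvA_step1
    simp only [hsm, pv_mod2, hprev, hset]
    cases k with
    | zero =>
      have hgf : ¬ ((1:Int) < ((0:Nat):Int)+1) := by norm_num
      rw [if_neg hgf]
      have hE : pvE u 1 = pvE u 0 := by simp [pvE]
      rcases pvS_parity u 1 with hp | hp <;>
        simp only [hp] at hC0 hC1 ⊢ <;> norm_num at hC0 hC1 ⊢ <;>
        rw [← hdpset] <;> simp [hE, hC0, hC1]
    | succ m =>
      have hgt : ((1:Int) < ((m+1:Nat):Int)+1) := by push_cast; omega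
      rw [if_pos hgt]
      have hidx : (((m+1:Nat):Int)+1) - 2 = ((m:Nat):Int) := by push_cast; ring
      have hdp2 : PySem.List.pyGetD (pvDP u N (m+1)) ((((m+1:Nat):Int)+1) - 2) ((0:Int),(0:Int))
          = (pvC0 u m, pvC1 u m) := by
        rw [hidx, PySem.List.pyGetD_natCast, pv_dp_getD u N (m+1) m (by omega)]
        simp
      have hE : pvE u (m+2) = pvE u (m+1) +
          (if pvS u (m+2) % 2 == 1 then pvC1 u m else pvC0 u m) := by
        show pvE u ((m+1)+1) = _
        simp [pvE]
      rw [hdp2]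
      rcases pvS_parity u (m+2) with hp | hp <;>
        simp only [hp] at hC0 hC1 hE ⊢ <;> norm_num at hC0 hC1 hE ⊢ <;>
        rw [← hdpset] <;> simp [hE, hC0, hC1]

lemma pv_getD_take (u : List Int) (N a : Nat) (ha : a < N) :
    (u.take N).getD a 0 = u.getD a 0 := by
  rw [List.getD_eq_getElem?_getD, List.getD_eq_getElem?_getD, List.getElem?_take, if_pos ha]

-- B's prefix array after fill iterations i = 0 .. k-1
def pvPF (u : List Int) (N k : Nat) : List Int :=
  (List.range (N+1)).map (fun j => if j ≤ k then pvS u j else 0)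

lemma pv_pf_getD (u : List Int) (N k j : Nat) (hj : j ≤ N) :
    (pvPF u N k).getD j 0 = if j ≤ k then pvS u j else 0 := by
  unfold pvPF
  rw [List.getD_eq_getElem?_getD, List.getElem?_map, List.getElem?_range (by omega)]
  simp

lemma pv_pf_set (u : List Int) (N k : Nat) (hk : k + 1 ≤ N) :
    (pvPF u N k).set (k+1) (pvS u (k+1)) = pvPF u N (k+1) := by
  unfold pvPF
  apply List.ext_getElem
  · simp
  · intro j hj hj'
    simp only [List.length_set, List.length_map, List.length_range] at hj
    rw [List.getElem_set]
    simp only [List.getElem_map, List.getElem_range]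
    rcases eq_or_ne j (k+1) with h | h
    · subst h; simp
    · rw [if_neg (by omega)]
      by_cases hjk : j ≤ k
      · rw [if_pos hjk, if_pos (by omega)]
      · rw [if_neg hjk, if_neg (by omega)]

lemma pv_pf0 (u : List Int) (N : Nat) :
    PySem.List.pySetD (List.replicate (N+1) (0:Int)) 0 0 = pvPF u N 0 := by
  have h0 : ((0:Int)) = ((0:Nat):Int) := rfl
  rw [h0, PySem.List.pySetD_natCast]
  apply List.ext_getElem
  · simp [pvPF]
  · intro j hj hj'
    simp only [List.length_set, List.length_replicate] at hj
    rw [List.getElem_set]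
    simp only [pvPF, List.getElem_map, List.getElem_range, List.getElem_replicate]
    rcases Nat.eq_zero_or_pos j with h | h
    · subst h; simp [pvS]
    · rw [if_neg (by omega), if_neg (by omega)]
      norm_num

lemma pv_fill (u : List Int) (N : Nat) (hN : N ≤ u.length) (k : Nat) (hk : k ≤ N) :
    (PySem.List.pyRange 0 (k:Int) 1).foldl
        (fun p i => PySem.List.pySetD p (i+1)
          (PySem.List.pyGetD p i 0 + PySem.List.pyGetD (u.take N) i 0)) (pvPF u N 0)
      = pvPF u N k := by
  induction k with
  | zero => rw [PySem.List.pyRange_one_eq_nil (by norm_num)]; simp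
  | succ k ih =>
    have hk' : k ≤ N := by omega
    rw [show ((k+1:Nat):Int) = ((k:Nat):Int) + 1 from by push_cast; ring,
        PySem.List.pyRange_one_succ_right (by positivity), List.foldl_append,
        ih hk', List.foldl_cons, List.foldl_nil]
    have hp : PySem.List.pyGetD (pvPF u N k) ((k:Nat):Int) 0 = pvS u k := by
      rw [PySem.List.pyGetD_natCast, pv_pf_getD u N k k hk', if_pos le_rfl]
    have hgt : PySem.List.pyGetD (u.take N) ((k:Nat):Int) 0 = u[k] := by
      rw [PySem.List.pyGetD_natCast, pv_getD_take u N k (by omega),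
          List.getD_eq_getElem u 0 (by omega)]
    rw [hp, hgt, show ((k:Nat):Int) + 1 = ((k+1:Nat):Int) from by push_cast; ring,
        PySem.List.pySetD_natCast, ← pvS_succ u k (by omega), pv_pf_set u N k hk]

lemma pv_narrB (arr : List Int) (N : Nat) (hN : N ≤ arr.length) :
    (PySem.List.pyRange 0 ((N:Nat):Int) 1).map
        (fun i => (PySem.Int.bitCount (PySem.List.pyGetD arr i 0) : Int))
      = (arr.map (fun i => (PySem.Int.bitCount i : Int))).take N := by
  rw [PySem.List.pyRange_one, show (((N:Nat):Int) - 0).toNat = N by omega, List.map_map]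
  apply List.ext_getElem
  · simp [List.length_take]; omega
  · intro j hj hj'
    simp only [List.length_map, List.length_range] at hj
    simp only [List.getElem_map, List.getElem_range, Function.comp, List.getElem_take]
    rw [show (0:Int) + (j:Int) = ((j:Nat):Int) from by ring, PySem.List.pyGetD_natCast,
        List.getD_eq_getElem arr 0 (by omega)]

lemma pv_inner (u : List Int) (N : Nat) (hN : N ≤ u.length) (l0 : Nat) :
    ∀ (m a b : Nat), l0 < a → b ≤ N → b ≤ a + m → ∀ (resA resB ma : Int),
    ((PySem.List.pyRange ((a:Int)+1) ((b:Int)+1) 1).foldl (pvA_inner u (pvSm u) ((l0:Int)+1)) (resA, ma)).1 - resA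
    = ((PySem.List.pyRange ((a:Int)) ((b:Int)) 1).foldl (pvB_inner (u.take N)) (resB, ma, pvS u a - pvS u l0)).1 - resB := by
  intro m
  induction m with
  | zero =>
    intro a b ha hb hm resA resB ma
    rw [PySem.List.pyRange_one_eq_nil (by omega), PySem.List.pyRange_one_eq_nil (by omega)]
    simp
  | succ m ih =>
    intro a b ha hb hm resA resB ma
    by_cases hab : b ≤ a
    · rw [PySem.List.pyRange_one_eq_nil (by omega), PySem.List.pyRange_one_eq_nil (by omega)]; simp
    · have haN : a < N := by omega
      have haU : a < u.length := by omega
      rw [PySem.List.pyRange_one_cons (show ((a:Int)) < ((b:Int)) by omega),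
          PySem.List.pyRange_one_cons (show ((a:Int))+1 < ((b:Int))+1 by omega)]
      simp only [List.foldl_cons]
      have hgu : PySem.List.pyGetD u ((a:Int)+1-1) 0 = u[a] := by
        have h1 : ((a:Int)+1-1) = ((a:Nat):Int) := by ring
        rw [h1, PySem.List.pyGetD_natCast, List.getD_eq_getElem u 0 haU]
      have hgt : PySem.List.pyGetD (u.take N) ((a:Int)) 0 = u[a] := by
        rw [PySem.List.pyGetD_natCast, pv_getD_take u N a haN, List.getD_eq_getElem u 0 haU]
      have hsmA : PySem.List.pyGetD (pvSm u) ((a:Int)+1) 0 = pvS u (a+1) := by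
        have h1 : ((a:Int)+1) = ((a+1:Nat):Int) := by push_cast; ring
        rw [h1, PySem.List.pyGetD_natCast, pv_sm_getD u (a+1) (by omega)]
      have hsmL : PySem.List.pyGetD (pvSm u) (((l0:Int)+1)-1) 0 = pvS u l0 := by
        have h1 : (((l0:Int)+1)-1) = ((l0:Nat):Int) := by ring
        rw [h1, PySem.List.pyGetD_natCast, pv_sm_getD u l0 (by omega)]
      have hS : pvS u (a+1) = pvS u a + u[a] := pvS_succ u a haU
      have hstepA : pvA_inner u (pvSm u) ((l0:Int)+1) (resA, ma) ((a:Int)+1)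
          = (if PySem.Int.mod (pvS u (a+1) - pvS u l0) 2 == 0 ∧
                max ma u[a] > (pvS u (a+1) - pvS u l0) - max ma u[a]
             then (resA - 1, max ma u[a]) else (resA, max ma u[a])) := by
        unfold pvA_inner
        simp only [hgu, hsmA, hsmL]
      have hstepB : pvB_inner (u.take N) (resB, ma, pvS u a - pvS u l0) ((a:Int))
          = (if PySem.Int.mod (pvS u (a+1) - pvS u l0) 2 == 0 ∧
                2 * max ma u[a] > pvS u (a+1) - pvS u l0
             then (resB - 1, max ma u[a], pvS u (a+1) - pvS u l0)
             else (resB, max ma u[a], pvS u (a+1) - pvS u l0)) := by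
        unfold pvB_inner
        have hcur : pvS u a - pvS u l0 + u[a] = pvS u (a+1) - pvS u l0 := by rw [hS]; ring
        simp only [hgt, hcur]
      rw [hstepA, hstepB]
      have hiff : (PySem.Int.mod (pvS u (a+1) - pvS u l0) 2 == 0 ∧
            max ma u[a] > (pvS u (a+1) - pvS u l0) - max ma u[a])
          ↔ (PySem.Int.mod (pvS u (a+1) - pvS u l0) 2 == 0 ∧
            2 * max ma u[a] > pvS u (a+1) - pvS u l0) := by
        constructor <;> rintro ⟨x, y⟩ <;> exact ⟨x, by omega⟩
      have hcast : ((a+1:Nat):Int) = ((a:Nat):Int)+1 := by push_cast; ring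
      by_cases hc : PySem.Int.mod (pvS u (a+1) - pvS u l0) 2 == 0 ∧
          2 * max ma u[a] > pvS u (a+1) - pvS u l0
      · rw [if_pos (hiff.mpr hc), if_pos hc]
        have IH := ih (a+1) b (by omega) hb (by omega) (resA - 1) (resB - 1) (max ma u[a])
        rw [hcast] at IH
        omega
      · rw [if_neg (fun h => hc (hiff.mp h)), if_neg hc]
        have IH := ih (a+1) b (by omega) hb (by omega) resA resB (max ma u[a])
        rw [hcast] at IH
        omega

lemma pv_portA_eq (arr : List Int) (N : Nat) (hN : N ≤ (pvBC arr).length) :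
    count_good_subsequences ((N:Nat):Int) arr =
      (PySem.List.pyRange 1 (((N:Nat):Int)+1) 1).foldl
        (fun res l => ((PySem.List.pyRange (l+1) (min (((N:Nat):Int)+1) (l+63)) 1).foldl
            (pvA_inner (pvBC arr) (pvSm (pvBC arr)) l)
            (res, PySem.List.pyGetD (pvBC arr) (l-1) 0)).1)
        (pvE (pvBC arr) N) := by
  unfold count_good_subsequences pvBC
  simp only [pv_sm_build0]
  rw [show ((((N:Nat):Int))+1).toNat = N+1 by omega]
  rw [pv_dp0 (arr.map (fun i => (PySem.Int.bitCount i : Int))) N]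
  rw [pv_loop1 _ N (by simpa [pvBC] using hN) N le_rfl]

lemma pv_portB_eq (arr : List Int) (N : Nat) (hN : N ≤ (pvBC arr).length) :
    count_good_subsequences_alt ((N:Nat):Int) arr =
      (PySem.List.pyRange 0 ((N:Nat):Int) 1).foldl
        (fun res l => ((PySem.List.pyRange (l+1) (min ((N:Nat):Int) (l+63)) 1).foldl
            (pvB_inner ((pvBC arr).take N))
            (res, PySem.List.pyGetD ((pvBC arr).take N) l 0,
              PySem.List.pyGetD ((pvBC arr).take N) l 0)).1)
        (pvE (pvBC arr) N) := by
  unfold count_good_subsequences_alt pvBC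
  rw [pv_narrB arr N (by simpa [pvBC] using hN)]
  set u := arr.map (fun i => (PySem.Int.bitCount i : Int)) with hu
  have hNlen : N ≤ u.length := by simpa [hu, pvBC] using hN
  dsimp only
  rw [show ((((N:Nat):Int))+1).toNat = N+1 from by omega, pv_pf0 u N,
      pv_fill u N hNlen N le_rfl]
  have hc0 : (pvPF u N N).foldl
      (fun acc s => if PySem.Int.mod s 2 == 0 then acc + 1 else acc) (0:Int) = pvC0 u N := by
    rw [PySem.List.foldl_if_add_one]
    unfold pvPF
    rw [List.countP_map]
    rw [List.countP_congr (q := fun i => pvS u i % 2 == 0) ?_]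
    · simp [pvC0]
    · intro x hx
      simp only [List.mem_range] at hx
      simp only [Function.comp, pv_mod2]
      rw [if_pos (by omega : x ≤ N)]
  have hev : (u.take N).foldl
      (fun acc v => if PySem.Int.mod v 2 == 0 then acc + 1 else acc) (0:Int) = pvEv u N := by
    rw [PySem.List.foldl_if_add_one]
    rw [List.countP_congr (q := fun v => v % 2 == 0) ?_]
    · simp [pvEv]
    · intro x _
      rw [pv_mod2]
  have hres0 : PySem.Int.floordiv (pvC0 u N * (pvC0 u N - 1)) 2 +
      PySem.Int.floordiv (pvC1 u N * (pvC1 u N - 1)) 2 - pvEv u N = pvE u N := by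
    rcases Int.even_mul_succ_self (pvC0 u N - 1) with ⟨m0, hm0⟩
    have h0 : pvC0 u N * (pvC0 u N - 1) = 2*m0 := by linear_combination hm0
    rcases Int.even_mul_succ_self (pvC1 u N - 1) with ⟨m1, hm1⟩
    have h1 : pvC1 u N * (pvC1 u N - 1) = 2*m1 := by linear_combination hm1
    have hident := pv_ident u N hNlen
    rw [h0, h1] at hident ⊢
    rw [PySem.Int.floordiv_eq_ediv_of_pos (by norm_num),
        PySem.Int.floordiv_eq_ediv_of_pos (by norm_num)]
    omega
  have hl2 : ((pvPF u N N).length : Int) = ((N:Nat):Int) + 1 := by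
    simp [pvPF]
  simp only [hc0, hev, hl2]
  have hc1 : ((N:Nat):Int) + 1 - pvC0 u N = pvC1 u N := by
    have := pvC_total u N; omega
  rw [hc1, hres0]

lemma pv_outer (arr : List Int) (N : Nat) (hN : N ≤ (pvBC arr).length) (init : Int) :
    (PySem.List.pyRange 1 (((N:Nat):Int)+1) 1).foldl
        (fun res l => ((PySem.List.pyRange (l+1) (min (((N:Nat):Int)+1) (l+63)) 1).foldl
            (pvA_inner (pvBC arr) (pvSm (pvBC arr)) l)
            (res, PySem.List.pyGetD (pvBC arr) (l-1) 0)).1) init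
    = (PySem.List.pyRange 0 ((N:Nat):Int) 1).foldl
        (fun res l => ((PySem.List.pyRange (l+1) (min ((N:Nat):Int) (l+63)) 1).foldl
            (pvB_inner ((pvBC arr).take N))
            (res, PySem.List.pyGetD ((pvBC arr).take N) l 0,
              PySem.List.pyGetD ((pvBC arr).take N) l 0)).1) init := by
  set u := pvBC arr with hu
  have hNu : N ≤ u.length := hN
  rw [PySem.List.pyRange_one 1 (((N:Nat):Int)+1), PySem.List.pyRange_one 0 ((N:Nat):Int)]
  rw [show ((((N:Nat):Int)+1) - 1).toNat = N by omega, show (((N:Nat):Int) - 0).toNat = N by omega]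
  rw [List.foldl_map, List.foldl_map]
  apply PySem.List.foldl_congr_mem
  intro acc x hx
  simp only [List.mem_range] at hx
  dsimp only
  have hxu : x < u.length := by omega
  rw [show (0:Int) + (x:Int) = ((x:Nat):Int) from by ring,
      show (1:Int) + (x:Int) = ((x:Nat):Int) + 1 from by ring]
  have hgl : PySem.List.pyGetD u (((x:Nat):Int)+1-1) 0 = u[x] := by
    rw [show (((x:Nat):Int)+1-1) = ((x:Nat):Int) from by ring,
       PySem.List.pyGetD_natCast, List.getD_eq_getElem u 0 hxu]
  have hgt : PySem.List.pyGetD (u.take N) ((x:Nat):Int) 0 = u[x] := by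
    rw [PySem.List.pyGetD_natCast, pv_getD_take u N x (by omega), List.getD_eq_getElem u 0 hxu]
  have hb1 : min (((N:Nat):Int)+1) ((((x:Nat):Int)+1)+63) = ((min N (x+63) : Nat):Int)+1 := by
    push_cast; omega
  have hb2 : min ((N:Nat):Int) (((x:Nat):Int)+63) = ((min N (x+63) : Nat):Int) := by
    push_cast; omega
  rw [hb1, hb2, hgl, hgt]
  have HI := pv_inner u N hNu x (min N (x+63)) (x+1) (min N (x+63))
    (by omega) (by omega) (by omega) acc acc (u[x])
  rw [show ((x+1:Nat):Int) = ((x:Nat):Int)+1 from by push_cast; ring,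
      show pvS u (x+1) - pvS u x = (u[x]:Int) from by rw [pvS_succ u x hxu]; ring] at HI
  omega

-- ===== VERDICT (by name: the statement is the Claim_ definition above) =====
theorem count_good_subsequences_spec : Claim_equal_count_good_subsequences := by
  unfold Claim_equal_count_good_subsequences
  intro n arr _ hpre
  unfold Spec_count_good_subsequences
  obtain ⟨hn, hlen⟩ := hpre
  lift n to Nat using hn with N
  have hN : N ≤ (pvBC arr).length := by
    simp only [pvBC, List.length_map]
    exact_mod_cast hlen
  rw [pv_portA_eq arr N hN, pv_portB_eq arr N hN, pv_outer arr N hN]
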